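-- pv_equiv track=rewrite | github.com/yuls12/Algorithm-Programmers | Level 2/[월간 코드 챌린지 시즌2] 2개 이하로 다른 비트/Solution.py | solution
-- ===== SOURCE A (Python) =====
-- def solution(numbers):
--     answer = []
--     for n in numbers:
--         t = list('0' + bin(n)[2:])
--         idx = ''.join(t).rfind('0')
--         t[idx] = '1'
--
--         if n % 2 == 1:
--             t[idx+1] = '0'
--         answer.append(int(''.join(t), 2))
--     return answer
-- ===== SOURCE B (Python) =====
-- def solution(numbers):
--     answer = []
--     for n in numbers:
--         if n % 2 == 0:
--             answer.append(n + 1)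
--         else:
--             p = 0
--             while (n >> p) & 1:
--                 p += 1
--             answer.append(n + (1 << (p - 1)))
--     return answer
-- ===== Notes on version B (the rewrite author's own statement) =====
-- stated objective: idiomatic
-- what changed: Replaces A's binary-string construction, rfind-from-the-right and character mutation with pure integer bit arithmetic: even n maps to n+1 directly, odd n adds 2^(p-1) where p is the lowest unset bit found by shifting; Pre_ restricts to the problem's natural domain of non-negative numbers (on negative n A's slice of bin(n)='-0b...' keeps the letter 'b' as a digit character, and B's bit scan diverges on -1).
-- outside the precondition, e.g. on solution([-1]): A returns [5], B does not finish within the time limit; on solution([-2]): A returns [3], B returns [-1]; on solution([-3, 194]): A returns [11, 195], B returns [-2, 195]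
import Mathlib
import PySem

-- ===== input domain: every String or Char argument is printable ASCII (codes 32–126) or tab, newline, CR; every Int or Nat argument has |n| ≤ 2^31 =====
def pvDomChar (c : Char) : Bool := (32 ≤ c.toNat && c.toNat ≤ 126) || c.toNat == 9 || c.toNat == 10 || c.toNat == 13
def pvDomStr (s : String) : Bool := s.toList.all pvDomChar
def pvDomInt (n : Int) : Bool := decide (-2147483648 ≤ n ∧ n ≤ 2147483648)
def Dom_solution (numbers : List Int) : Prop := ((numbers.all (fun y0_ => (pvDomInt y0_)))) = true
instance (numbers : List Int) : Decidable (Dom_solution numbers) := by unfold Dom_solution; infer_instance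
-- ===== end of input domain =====

-- B replaces A's binary-string building / rfind / character mutation with integer bit
-- arithmetic (even n ↦ n+1; odd n ↦ n + 2^(p-1) for p the lowest unset bit); same cost.

-- ===== PORT A =====
-- bin(n)[2:] for n ≥ 0, digits most significant first (Python's repeated-division string)
def binAux (n : Nat) : List Char :=
  if _h : n = 0 then []
  else binAux (n / 2) ++ [if n % 2 = 1 then '1' else '0']
decreasing_by exact Nat.div_lt_self (Nat.pos_of_ne_zero _h) (by omega)

def binStr (n : Nat) : List Char := if n = 0 then ['0'] else binAux n

-- ''.join(t).rfind('0'): index of the rightmost '0' (t always starts with '0' in A,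
-- so the not-found value -1 is unreachable; we return 0 there)
def rfind0 : List Char → Nat
  | [] => 0
  | _ :: rest => if '0' ∈ rest then rfind0 rest + 1 else 0

-- int(s, 2) on a string of '0'/'1' digits
def parse2 (t : List Char) : Nat :=
  t.foldl (fun a c => 2 * a + (if c = '1' then 1 else 0)) 0

def aFun (n : Nat) : Nat :=
  let t := '0' :: binStr n
  let idx := rfind0 t
  let t1 := t.set idx '1'
  let t2 := if n % 2 = 1 then t1.set (idx + 1) '0' else t1
  parse2 t2

def solution (numbers : List Int) : List Int :=
  numbers.map (fun n => ((aFun n.toNat : Nat) : Int))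

-- ===== PORT B =====
-- p = 0; while (n >> p) & 1: p += 1  — lowest unset bit, as structural recursion on n
def lowZero (n : Nat) : Nat :=
  if _h : n % 2 = 1 then lowZero (n / 2) + 1 else 0
decreasing_by exact Nat.div_lt_self (by omega) (by omega)

-- Python's n % 2 with the positive divisor 2 agrees with Lean's Int.emod `% 2` exactly;
-- the bit scan is performed on the magnitude (for n ≥ 0, i.e. inside Pre_, n.toNat = n)
def solution_alt (numbers : List Int) : List Int :=
  numbers.map (fun n => if n % 2 = 0 then n + 1 else n + 2 ^ (lowZero n.toNat - 1))

-- ===== PRECONDITION & SPEC =====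
-- Pre_ restricts to the problem's natural domain, non-negative numbers: on negative n,
-- bin(n) = '-0b…' and A's slice keeps the letter 'b' as a digit character, so the value A returns
-- does not correspond to any bit transformation of n, while B's natural
-- bit scan diverges on -1 (every bit set) and returns different values elsewhere.
def Pre_solution (numbers : List Int) : Prop := (numbers.all (fun n => decide (0 ≤ n))) = true
instance (numbers : List Int) : Decidable (Pre_solution numbers) := by
  unfold Pre_solution; infer_instance

def pvWitness_solution : List Int := [0, 1, 2, 6, 23]

def Spec_solution (numbers : List Int) (out : List Int) : Prop := out = solution_alt numbers
instance (numbers : List Int) (out : List Int) : Decidable (Spec_solution numbers out) := by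
  unfold Spec_solution; infer_instance

-- ===== CLAIM (what is proved, stated in full; the proofs are below) =====
def Claim_equal_solution : Prop :=
  ∀ (numbers : List Int), Dom_solution numbers → Pre_solution numbers →
    Spec_solution numbers (solution numbers)

-- ===== LEMMAS AND PROOFS =====

theorem binAux_ne (n : Nat) (h : n ≠ 0) :
    binAux n = binAux (n / 2) ++ [if n % 2 = 1 then '1' else '0'] := by
  rw [binAux]; simp [h]

-- '0' + binStr n always decomposes as prefix-for-n/2 plus the last bit
theorem t_decomp (n : Nat) :
    '0' :: binStr n = ('0' :: binAux (n / 2)) ++ [if n % 2 = 1 then '1' else '0'] := by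
  by_cases h : n = 0
  · subst h; simp [binStr, binAux]
  · simp [binStr, h, binAux_ne n h]

theorem parse2_append (xs : List Char) (c : Char) :
    parse2 (xs ++ [c]) = 2 * parse2 xs + (if c = '1' then 1 else 0) := by
  simp [parse2, List.foldl_append]

theorem parse2_append1 (xs : List Char) : parse2 (xs ++ ['1']) = 2 * parse2 xs + 1 := by
  simp [parse2_append]

theorem parse2_append0 (xs : List Char) : parse2 (xs ++ ['0']) = 2 * parse2 xs := by
  simp [parse2_append]

theorem parse2_P (m : Nat) : parse2 ('0' :: binAux m) = m := by
  induction m using Nat.strong_induction_on with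
  | _ m ih =>
    by_cases h : m = 0
    · subst h; simp [binAux, parse2]
    · rw [binAux_ne m h, ← List.cons_append, parse2_append,
          ih (m / 2) (Nat.div_lt_self (Nat.pos_of_ne_zero h) (by omega))]
      by_cases hp : m % 2 = 1
      · simp [hp]; omega
      · simp [hp]; omega

theorem rfind0_lt {xs : List Char} (h : '0' ∈ xs) : rfind0 xs < xs.length := by
  induction xs with
  | nil => cases h
  | cons c rest ih =>
    simp only [rfind0]
    by_cases h0 : '0' ∈ rest
    · simp [h0, Nat.succ_lt_succ (ih h0)]
    · simp [h0]

theorem rfind0_append_one (xs : List Char) : rfind0 (xs ++ ['1']) = rfind0 xs := by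
  induction xs with
  | nil => simp [rfind0]
  | cons c rest ih =>
    simp only [List.cons_append, rfind0]
    by_cases h0 : '0' ∈ rest
    · simp [h0, List.mem_append, ih]
    · simp [h0, List.mem_append]

theorem rfind0_append_zero (xs : List Char) : rfind0 (xs ++ ['0']) = xs.length := by
  induction xs with
  | nil => simp [rfind0]
  | cons c rest ih =>
    simp only [List.cons_append, rfind0]
    simp [List.mem_append, ih]

-- for even m the rightmost '0' of '0'::binAux m is its last character …
theorem rfind0_P_even (m : Nat) (h : m % 2 = 0) :
    rfind0 ('0' :: binAux m) + 1 = ('0' :: binAux m).length := by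
  by_cases h0 : m = 0
  · subst h0; simp [binAux, rfind0]
  · rw [show ('0' :: binAux m) = ('0' :: binAux (m / 2)) ++ ['0'] from by
        rw [binAux_ne m h0, ← List.cons_append]; simp [h]]
    rw [rfind0_append_zero]; simp

-- … and flipping it to '1' yields m + 1
theorem parse2_P_even_set (m : Nat) (h : m % 2 = 0) :
    parse2 (('0' :: binAux m).set (rfind0 ('0' :: binAux m)) '1') = m + 1 := by
  by_cases h0 : m = 0
  · subst h0; simp [binAux, rfind0, parse2]
  · rw [show ('0' :: binAux m) = ('0' :: binAux (m / 2)) ++ ['0'] from by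
        rw [binAux_ne m h0, ← List.cons_append]; simp [h]]
    rw [rfind0_append_zero, List.set_append_right _ _ (Nat.le_refl _)]
    simp only [Nat.sub_self, List.set_cons_zero]
    rw [parse2_append1, parse2_P]
    omega

theorem lowZero_odd (m : Nat) (h : m % 2 = 1) : lowZero m = lowZero (m / 2) + 1 := by
  rw [lowZero]; simp [h]

theorem lowZero_even (m : Nat) (h : m % 2 = 0) : lowZero m = 0 := by
  rw [lowZero]; simp [h]

-- B's per-element value, over Nat (proof-side restatement of the map body for n ≥ 0)
def bFun (n : Nat) : Nat :=
  if n % 2 = 0 then n + 1 else n + 2 ^ (lowZero n - 1)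

theorem aFun_eq_bFun (n : Nat) : aFun n = bFun n := by
  induction n using Nat.strong_induction_on with
  | _ n ih =>
    by_cases hpar : n % 2 = 1
    · -- odd n: t = ('0'::binAux (n/2)) ++ ['1'], both mutations analysed in the prefix
      have ht : '0' :: binStr n = ('0' :: binAux (n / 2)) ++ ['1'] := by
        rw [t_decomp n]; simp [hpar]
      have hlt : rfind0 ('0' :: binAux (n / 2)) < ('0' :: binAux (n / 2)).length :=
        rfind0_lt (by simp)
      simp only [aFun]
      rw [if_pos hpar, ht, rfind0_append_one, List.set_append_left _ _ hlt]
      by_cases hm : (n / 2) % 2 = 1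
      · -- n/2 odd: the second mutation also lands in the prefix; recurse on n/2
        have hm0 : n / 2 ≠ 0 := by omega
        have hPP : binAux (n / 2) = binAux (n / 2 / 2) ++ ['1'] := by
          rw [binAux_ne _ hm0]; simp [hm]
        have hidx2 : rfind0 ('0' :: binAux (n / 2)) = rfind0 ('0' :: binAux (n / 2 / 2)) := by
          rw [hPP, ← List.cons_append, rfind0_append_one]
        have hlen2 : ('0' :: binAux (n / 2)).length = ('0' :: binAux (n / 2 / 2)).length + 1 := by
          rw [hPP]; simp
        have hlt2 : rfind0 ('0' :: binAux (n / 2)) + 1 < ('0' :: binAux (n / 2)).length := by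
          rw [hidx2]
          have := rfind0_lt (show '0' ∈ '0' :: binAux (n / 2 / 2) by simp)
          omega
        rw [List.set_append_left _ _ (by simpa using hlt2), parse2_append1]
        have htm : '0' :: binStr (n / 2) = '0' :: binAux (n / 2) := by
          rw [t_decomp (n / 2), hPP, ← List.cons_append]; simp [hm]
        have hrec : aFun (n / 2)
            = parse2 (((('0' :: binAux (n / 2)).set (rfind0 ('0' :: binAux (n / 2))) '1').set
                (rfind0 ('0' :: binAux (n / 2)) + 1) '0')) := by
          simp only [aFun, htm]
          rw [if_pos hm]
        rw [← hrec, ih (n / 2) (by omega)]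
        have hbn2 : bFun (n / 2) = n / 2 + 2 ^ (lowZero (n / 2) - 1) := by
          simp only [bFun]; rw [if_neg (by omega)]
        have hbn : bFun n = n + 2 ^ (lowZero n - 1) := by
          simp only [bFun]; rw [if_neg (by omega)]
        rw [hbn2, hbn, lowZero_odd n hpar]
        have hge : 1 ≤ lowZero (n / 2) := by rw [lowZero_odd _ hm]; omega
        have h2 : 2 * 2 ^ (lowZero (n / 2) - 1) = 2 ^ lowZero (n / 2) := by
          rw [← pow_succ']; congr 1; omega
        simp only [Nat.add_sub_cancel]
        omega
      · -- n/2 even: the second mutation overwrites the appended last '1'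
        have hm' : (n / 2) % 2 = 0 := by omega
        have hlen : rfind0 ('0' :: binAux (n / 2)) + 1 = ('0' :: binAux (n / 2)).length :=
          rfind0_P_even _ hm'
        have hl : (('0' :: binAux (n / 2)).set (rfind0 ('0' :: binAux (n / 2))) '1').length
            = rfind0 ('0' :: binAux (n / 2)) + 1 := by simp [← hlen]
        rw [List.set_append_right _ _ (le_of_eq hl), hl]
        simp only [Nat.sub_self, List.set_cons_zero]
        rw [parse2_append0, parse2_P_even_set _ hm']
        have hbn : bFun n = n + 2 ^ (lowZero n - 1) := by
          simp only [bFun]; rw [if_neg (by omega)]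
        rw [hbn, lowZero_odd n hpar, lowZero_even _ hm']
        simp only [Nat.add_sub_cancel, pow_zero]
        omega
    · -- even n: the rightmost '0' is the appended last bit; flipping it gives n + 1
      have hpar' : n % 2 = 0 := by omega
      have ht : '0' :: binStr n = ('0' :: binAux (n / 2)) ++ ['0'] := by
        rw [t_decomp n]; simp [hpar']
      simp only [aFun]
      rw [if_neg hpar, ht, rfind0_append_zero, List.set_append_right _ _ (Nat.le_refl _)]
      simp only [Nat.sub_self, List.set_cons_zero]
      rw [parse2_append1, parse2_P]
      simp only [bFun]
      rw [if_pos hpar']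
      omega

-- ===== VERDICT (by name: the statement is the Claim_ definition above) =====
theorem solution_spec : Claim_equal_solution := by
  intro numbers _ hpre
  unfold Spec_solution solution solution_alt
  apply List.map_congr_left
  intro n hn
  simp only [Pre_solution, List.all_eq_true, decide_eq_true_eq] at hpre
  have h0 : 0 ≤ n := hpre n hn
  rw [aFun_eq_bFun]
  by_cases he : n % 2 = 0
  · rw [if_pos he]
    simp only [bFun, if_pos (show n.toNat % 2 = 0 by omega)]
    omega
  · rw [if_neg he]
    simp only [bFun, if_neg (show ¬ n.toNat % 2 = 0 by omega)]
    push_cast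
    rw [show ((n.toNat : Int)) = n by omega]
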